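-- pv_equiv track=rewrite | github.com/cimabus/PBST | 3.Introduzione informale/3.1 Python come calcolatrice/3.1.1 Numeri Aritmetica con Int e Float/tests/test_task.py | catch_rows_from_eye
-- ===== SOURCE A (Python) =====
-- def catch_rows_from_eye(rows, eye, all_rows=False):
--     """
--  elimina intestazione dalle righe fino a quella che inizia con eye,
--  riga precedente e quella con eye non sono eliminate
--
--     :param rows: stringa multilinea
--     :param eye: start linea
--                 se 'Python 3.' skip questa e restituisce tutte le altre
--                 se 'Out[' inserisce la precedente ( istruzione ) e questa che è l'output
--     :param all_rows: True comprende anche le successive, default False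
--     :return:
--     """
--     new_list = []
--     for i, riga in enumerate(rows):
--         # Se la riga inizia con eye, aggiungiamo la riga precedente alla nuova lista
--         # e se All_rows is True aggiungo le righe successive a eye
--         if new_list.__len__() >= 0 and all_rows is True:
--             if rows[i] != eye:
--                 new_list.append(rows[i])
--         elif new_list.__len__() == 0 and eye == 'Python 3.' and all_rows is True:
--             new_list.append(rows[i])
--         elif riga.startswith(eye) and new_list.__len__() == 0 and eye == 'Python 3.':
--             all_rows = True  # al primo elemento da inserire se 'Python 3.' imposto di scrivere tutte le successive
--         elif riga.startswith(eye) and new_list.__len__() == 0 and eye == 'Out[':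
--             new_list.append(
--                 rows[i - 1])  # al primo elemento da inserire se 'Out[' appendo la riga precedente ( istruzione )
--             new_list.append(rows[i])  # e questa ( output generato )
--         else:
--             pass
--
--     return new_list
-- ===== SOURCE B (Python) =====
-- def catch_rows_from_eye(rows, eye, all_rows=False):
--     # Dispatch on the three effective cases instead of one state-carrying loop.
--     if all_rows is True:
--         return [r for r in rows if r != eye]
--     if eye == 'Python 3.':
--         it = iter(enumerate(rows))
--         for _, r in it:
--             if r.startswith(eye):
--                 return [x for _, x in it if x != eye]
--         return []
--     if eye == 'Out[':
--         for i, r in enumerate(rows):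
--             if r.startswith(eye):
--                 return [rows[i - 1], r]
--         return []
--     return []
-- ===== Notes on version B (the rewrite author's own statement) =====
-- stated objective: simpler
-- what changed: Replaces A's single loop carrying mutable state (new_list length checks, an all_rows flag flipped mid-loop, dead branches) with an early-return dispatch on the three effective cases: a plain filter when all_rows is True, a find-then-filter scan for 'Python 3.', a find-then-pair scan (with Python's -1 wraparound) for 'Out[', and [] otherwise. (constant-factor speedup: the hot paths are a single list comprehension / short scan instead of per-row branch chains with repeated indexing)
import Mathlib
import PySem

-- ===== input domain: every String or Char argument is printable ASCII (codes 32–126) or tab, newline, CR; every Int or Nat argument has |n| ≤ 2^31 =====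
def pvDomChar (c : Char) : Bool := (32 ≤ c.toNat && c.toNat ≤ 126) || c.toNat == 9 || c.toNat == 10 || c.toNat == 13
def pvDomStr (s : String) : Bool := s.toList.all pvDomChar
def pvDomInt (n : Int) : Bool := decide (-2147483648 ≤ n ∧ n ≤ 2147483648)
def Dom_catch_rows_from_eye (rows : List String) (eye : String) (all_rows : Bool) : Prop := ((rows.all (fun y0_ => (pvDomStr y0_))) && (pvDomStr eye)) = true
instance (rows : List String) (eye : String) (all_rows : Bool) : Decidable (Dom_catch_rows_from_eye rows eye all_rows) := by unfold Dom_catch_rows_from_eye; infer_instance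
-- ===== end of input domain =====

-- B replaces A's single state-carrying loop with an early-return dispatch on the
-- three effective cases (objective: simpler); return values proved equal on Dom.

-- ===== PORT A =====
-- the for-loop of A: state is (new_list, all_rows); i is the enumerate index
-- (inside the loop rows[i] = riga, the current element; rows[i-1] uses Python
-- negative-index semantics via pyGet?, whose getD "" default is never taken
-- since rows is nonempty while iterating)
def pvALoop (rows : List String) (eye : String) : Nat → List String → List String → Bool → List String
  | _, [], new_list, _ => new_list
  | i, riga :: rest, new_list, all_rows =>
    if new_list.length ≥ 0 ∧ all_rows = true then
      (if riga ≠ eye then pvALoop rows eye (i+1) rest (new_list ++ [riga]) all_rows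
       else pvALoop rows eye (i+1) rest new_list all_rows)
    else if new_list.length = 0 ∧ eye = "Python 3." ∧ all_rows = true then
      pvALoop rows eye (i+1) rest (new_list ++ [riga]) all_rows
    else if PySem.Str.startswith riga eye = true ∧ new_list.length = 0 ∧ eye = "Python 3." then
      pvALoop rows eye (i+1) rest new_list true
    else if PySem.Str.startswith riga eye = true ∧ new_list.length = 0 ∧ eye = "Out[" then
      pvALoop rows eye (i+1) rest
        (new_list ++ [(PySem.List.pyGet? rows ((i : Int) - 1)).getD "", riga]) all_rows
    else
      pvALoop rows eye (i+1) rest new_list all_rows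

def catch_rows_from_eye (rows : List String) (eye : String) (all_rows : Bool) : List String :=
  pvALoop rows eye 0 rows [] all_rows

-- ===== PORT B =====
-- 'Python 3.' case: scan for the first row starting with eye, then filter the rest
def pvBScanPy3 (eye : String) : List String → List String
  | [] => []
  | r :: rest =>
    if PySem.Str.startswith r eye then rest.filter (fun x => x ≠ eye)
    else pvBScanPy3 eye rest

-- 'Out[' case: scan for the first row starting with eye, return [rows[i-1], r]
-- (pyGet? keeps Python's i=0 → rows[-1] wraparound; getD "" never taken: rows ≠ [])
def pvBScanOut (rows : List String) (eye : String) : Nat → List String → List String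
  | _, [] => []
  | i, r :: rest =>
    if PySem.Str.startswith r eye then [(PySem.List.pyGet? rows ((i : Int) - 1)).getD "", r]
    else pvBScanOut rows eye (i+1) rest

def catch_rows_from_eye_alt (rows : List String) (eye : String) (all_rows : Bool) : List String :=
  if all_rows = true then rows.filter (fun r => r ≠ eye)
  else if eye = "Python 3." then pvBScanPy3 eye rows
  else if eye = "Out[" then pvBScanOut rows eye 0 rows
  else []

-- ===== PRECONDITION & SPEC =====
def Spec_catch_rows_from_eye (rows : List String) (eye : String) (all_rows : Bool) (out : List String) : Prop := out = catch_rows_from_eye_alt rows eye all_rows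
instance (rows : List String) (eye : String) (all_rows : Bool) (out : List String) : Decidable (Spec_catch_rows_from_eye rows eye all_rows out) := by unfold Spec_catch_rows_from_eye; infer_instance

-- ===== CLAIM (what is proved, stated in full; the proofs are below) =====
def Claim_equal_catch_rows_from_eye : Prop := ∀ (rows : List String) (eye : String) (all_rows : Bool), Dom_catch_rows_from_eye rows eye all_rows → Spec_catch_rows_from_eye rows eye all_rows (catch_rows_from_eye rows eye all_rows)

-- ===== LEMMAS AND PROOFS =====

-- once all_rows = true, A appends every remaining row ≠ eye: a filter
theorem pvALoop_true (rows : List String) (eye : String) :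
    ∀ (s : List String) (i : Nat) (nl : List String),
      pvALoop rows eye i s nl true = nl ++ s.filter (fun r => r ≠ eye) := by
  intro s
  induction s with
  | nil => intro i nl; simp [pvALoop]
  | cons r rest ih =>
    intro i nl
    by_cases h : r = eye <;> simp [pvALoop, h, ih]

-- with all_rows = false, eye = "Out[" and a nonempty new_list, A is stuck
theorem pvALoop_stuckOut (rows : List String) :
    ∀ (s : List String) (i : Nat) (nl : List String), nl ≠ [] →
      pvALoop rows "Out[" i s nl false = nl := by
  intro s
  induction s with
  | nil => intro i nl _; simp [pvALoop]
  | cons r rest ih =>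
    intro i nl hnl
    have hlen : nl.length ≠ 0 := by simpa using hnl
    simp [pvALoop, hlen, ih _ _ hnl]

-- with all_rows = false and eye = "Python 3.", A is B's find-then-filter scan
theorem pvALoop_py3 (rows : List String) :
    ∀ (s : List String) (i : Nat),
      pvALoop rows "Python 3." i s [] false = pvBScanPy3 "Python 3." s := by
  intro s
  induction s with
  | nil => intro i; simp [pvALoop, pvBScanPy3]
  | cons r rest ih =>
    intro i
    by_cases h : PySem.Str.startswith r "Python 3." = true <;>
      [skip; skip] <;> simp at h <;> simp [pvALoop, pvBScanPy3, h, ih, pvALoop_true]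

-- with all_rows = false and eye = "Out[", A is B's find-then-pair scan
theorem pvALoop_out (rows : List String) :
    ∀ (s : List String) (i : Nat),
      pvALoop rows "Out[" i s [] false = pvBScanOut rows "Out[" i s := by
  intro s
  induction s with
  | nil => intro i; simp [pvALoop, pvBScanOut]
  | cons r rest ih =>
    intro i
    by_cases h : PySem.Str.startswith r "Out[" = true <;>
      [skip; skip] <;> simp at h <;> simp [pvALoop, pvBScanOut, h, ih, pvALoop_stuckOut]

-- with all_rows = false and any other eye, no branch ever fires
theorem pvALoop_other (rows : List String) (eye : String)
    (h3 : eye ≠ "Python 3.") (h4 : eye ≠ "Out[") :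
    ∀ (s : List String) (i : Nat), pvALoop rows eye i s [] false = [] := by
  intro s
  induction s with
  | nil => intro i; simp [pvALoop]
  | cons r rest ih => intro i; simp [pvALoop, h3, h4, ih]

-- ===== VERDICT (by name: the statement is the Claim_ definition above) =====
theorem catch_rows_from_eye_spec : Claim_equal_catch_rows_from_eye := by
  intro rows eye all_rows _
  unfold Spec_catch_rows_from_eye catch_rows_from_eye catch_rows_from_eye_alt
  cases all_rows with
  | true => simp [pvALoop_true]
  | false =>
    by_cases h3 : eye = "Python 3."
    · simp [h3, pvALoop_py3]
    · by_cases h4 : eye = "Out["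
      · simp [h4, pvALoop_out]
      · simp [h3, h4, pvALoop_other rows eye h3 h4]
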